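-- pv_equiv track=rewrite | github.com/extraordinary-yh/engagehub-backend-bot | cogs/admin.py | find_reward_matches
-- ===== SOURCE A (Python) =====
-- def find_reward_matches(rewards, search_term):
--     """Smart reward matching with conflict detection"""
--     search_lower = search_term.lower()
--
--     # First try exact matches
--     exact_matches = [r for r in rewards if r.get('name', '').lower() == search_lower]
--     if exact_matches:
--         return exact_matches, "exact"
--
--     # Then try partial matches
--     partial_matches = [r for r in rewards if search_lower in r.get('name', '').lower()]
--     if partial_matches:
--         return partial_matches, "partial"
--
--     return [], "none"
-- ===== SOURCE B (Python) =====
-- def find_reward_matches(rewards, search_term):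
--     """Single-pass reward matching: one loop, two accumulators."""
--     search_lower = search_term.lower()
--     exact, partial = [], []
--     for r in rewards:
--         name_lower = r.get('name', '').lower()
--         if name_lower == search_lower:
--             exact.append(r)
--         if search_lower in name_lower:
--             partial.append(r)
--     if exact:
--         return exact, "exact"
--     if partial:
--         return partial, "partial"
--     return [], "none"
-- ===== Notes on version B (the rewrite author's own statement) =====
-- stated objective: alternative
-- what changed: Two sequential full-list comprehensions (exact filter, then partial filter) are fused into one explicit loop over rewards that maintains two accumulators, lowercasing each name once; the result is selected after the single traversal.
import Mathlib
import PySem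

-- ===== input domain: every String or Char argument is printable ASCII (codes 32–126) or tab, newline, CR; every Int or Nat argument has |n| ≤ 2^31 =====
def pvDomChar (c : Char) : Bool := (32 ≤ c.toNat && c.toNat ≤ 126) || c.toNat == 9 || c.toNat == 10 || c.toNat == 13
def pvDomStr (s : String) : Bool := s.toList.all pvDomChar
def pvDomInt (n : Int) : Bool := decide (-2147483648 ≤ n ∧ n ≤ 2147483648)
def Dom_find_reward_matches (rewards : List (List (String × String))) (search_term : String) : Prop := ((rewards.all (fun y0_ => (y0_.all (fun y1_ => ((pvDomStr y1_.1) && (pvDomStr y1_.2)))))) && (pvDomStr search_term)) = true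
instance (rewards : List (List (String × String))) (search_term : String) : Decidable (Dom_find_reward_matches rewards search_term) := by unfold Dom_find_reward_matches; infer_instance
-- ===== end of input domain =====

-- ===== PORT A =====
-- A: two sequential filters (exact, then partial); B fuses them into one pass with two accumulators.
def find_reward_matches (rewards : List (List (String × String))) (search_term : String) : (List (List (String × String))) × String :=
  let search_lower := PySem.Str.lower search_term
  let exact_matches := rewards.filter
    (fun r => PySem.Str.lower ((PySem.Dict.mk r).getD "name" "") == search_lower)
  if !exact_matches.isEmpty then (exact_matches, "exact")
  else
    let partial_matches := rewards.filter
      (fun r => PySem.Str.isIn search_lower (PySem.Str.lower ((PySem.Dict.mk r).getD "name" "")))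
    if !partial_matches.isEmpty then (partial_matches, "partial")
    else ([], "none")

-- ===== PORT B =====
def find_reward_matches_alt (rewards : List (List (String × String))) (search_term : String) : (List (List (String × String))) × String :=
  let search_lower := PySem.Str.lower search_term
  let acc := rewards.foldl
    (fun (acc : List (List (String × String)) × List (List (String × String))) r =>
      let name_lower := PySem.Str.lower ((PySem.Dict.mk r).getD "name" "")
      let ex := if name_lower == search_lower then acc.1 ++ [r] else acc.1
      let pa := if PySem.Str.isIn search_lower name_lower then acc.2 ++ [r] else acc.2
      (ex, pa))
    ([], [])
  if !acc.1.isEmpty then (acc.1, "exact")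
  else if !acc.2.isEmpty then (acc.2, "partial")
  else ([], "none")

-- ===== PRECONDITION & SPEC =====
def Spec_find_reward_matches (rewards : List (List (String × String))) (search_term : String) (out : (List (List (String × String))) × String) : Prop := out = find_reward_matches_alt rewards search_term
instance (rewards : List (List (String × String))) (search_term : String) (out : (List (List (String × String))) × String) : Decidable (Spec_find_reward_matches rewards search_term out) := by unfold Spec_find_reward_matches; infer_instance

-- ===== CLAIM (what is proved, stated in full; the proofs are below) =====
def Claim_equal_find_reward_matches : Prop := ∀ (rewards : List (List (String × String))) (search_term : String), Dom_find_reward_matches rewards search_term → Spec_find_reward_matches rewards search_term (find_reward_matches rewards search_term)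

-- ===== LEMMAS AND PROOFS =====
-- B's fused fold computes exactly the two filters A computes.
theorem foldl_two_filters {α : Type} (p q : α → Bool) (xs : List α) (a b : List α) :
    xs.foldl (fun (acc : List α × List α) r =>
        ((if p r then acc.1 ++ [r] else acc.1),
         (if q r then acc.2 ++ [r] else acc.2))) (a, b)
      = (a ++ xs.filter p, b ++ xs.filter q) := by
  induction xs generalizing a b with
  | nil => simp
  | cons x xs ih =>
    simp only [List.foldl_cons, ih, List.filter_cons]
    by_cases hp : p x <;> by_cases hq : q x <;> simp [hp, hq]

-- ===== VERDICT (by name: the statement is the Claim_ definition above) =====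
theorem find_reward_matches_spec : Claim_equal_find_reward_matches := by
  intro rewards search_term _
  unfold Spec_find_reward_matches find_reward_matches find_reward_matches_alt
  simp only [foldl_two_filters, List.nil_append]
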